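-- pv_equiv track=rewrite | github.com/BokerWalker/HomeWork-Dina | MatrixHM.py | maxaddmat
-- ===== SOURCE A (Python) =====
-- def checkmatrix (matrix):
--     numsinrow = 0
--     for r in range(len(matrix)):
--         if(numsinrow == 0):
--             numsinrow = len(matrix[r])
--         else:
--             if(numsinrow != len(matrix[r])):
--                 return False
--     return True
--
-- def minaddmat (fmat,smat):
--     if(not checkmatrix(fmat) or not checkmatrix(smat)):
--         return
--     rows = min(len(fmat),len(smat))
--     columns = min(len(fmat[0]),len(smat[0]))
--     remat = [[0 for i in range (columns)] for j in range(rows)]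
--     for r in range(rows):
--         for c in range(columns):
--             remat[r][c] = fmat[r][c] + smat[r][c]
--     return remat
--
-- def maxaddmat (fmat,smat):
--     rows = max(len(fmat),len(smat))
--     columns = max(len(fmat[0]),len(smat[0]))
--     remat = [[0 for i in range (columns)] for j in range(rows)]
--     comat = minaddmat(fmat,smat)
--     for r in range(rows):
--         for c in range(columns):
--             try:
--                 remat[r][c] = comat[r][c]
--             except:
--                 try:
--                     remat[r][c] = fmat[r][c]
--                 except:
--                     try:
--                         remat[r][c] = smat[r][c]
--                     except:
--                         remat[r][c] = remat[r][c]
--     return remat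
-- ===== SOURCE B (Python) =====
-- def checkmatrix (matrix):
--     numsinrow = 0
--     for r in range(len(matrix)):
--         if(numsinrow == 0):
--             numsinrow = len(matrix[r])
--         else:
--             if(numsinrow != len(matrix[r])):
--                 return False
--     return True
--
-- def minaddmat (fmat,smat):
--     if(not checkmatrix(fmat) or not checkmatrix(smat)):
--         return
--     rows = min(len(fmat),len(smat))
--     columns = min(len(fmat[0]),len(smat[0]))
--     remat = [[0 for i in range (columns)] for j in range(rows)]
--     for r in range(rows):
--         for c in range(columns):
--             remat[r][c] = fmat[r][c] + smat[r][c]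
--     return remat
--
-- def maxaddmat (fmat,smat):
--     rows = max(len(fmat),len(smat))
--     columns = max(len(fmat[0]),len(smat[0]))
--     remat = [[0]*columns for _ in range(rows)]
--     # pass 1: smat cells, then pass 2: fmat cells (fmat wins on overlap)
--     for src in (smat, fmat):
--         for r in range(min(rows, len(src))):
--             row = src[r]
--             for c in range(min(columns, len(row))):
--                 remat[r][c] = row[c]
--     # pass 3: if both matrices are regular, the overlap gets the sum
--     comat = minaddmat(fmat, smat)
--     if comat is not None:
--         for r in range(len(comat)):
--             crow = comat[r]
--             for c in range(len(crow)):
--                 remat[r][c] = crow[c]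
--     return remat
-- ===== Notes on version B (the rewrite author's own statement) =====
-- stated objective: alternative
-- what changed: Replaces A's per-cell three-level try/except cascade with three whole-matrix overwriting passes into a zero matrix (smat, then fmat, then the regular-overlap sum from minaddmat), each pass bounded by the source's actual row lengths.
import Mathlib
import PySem

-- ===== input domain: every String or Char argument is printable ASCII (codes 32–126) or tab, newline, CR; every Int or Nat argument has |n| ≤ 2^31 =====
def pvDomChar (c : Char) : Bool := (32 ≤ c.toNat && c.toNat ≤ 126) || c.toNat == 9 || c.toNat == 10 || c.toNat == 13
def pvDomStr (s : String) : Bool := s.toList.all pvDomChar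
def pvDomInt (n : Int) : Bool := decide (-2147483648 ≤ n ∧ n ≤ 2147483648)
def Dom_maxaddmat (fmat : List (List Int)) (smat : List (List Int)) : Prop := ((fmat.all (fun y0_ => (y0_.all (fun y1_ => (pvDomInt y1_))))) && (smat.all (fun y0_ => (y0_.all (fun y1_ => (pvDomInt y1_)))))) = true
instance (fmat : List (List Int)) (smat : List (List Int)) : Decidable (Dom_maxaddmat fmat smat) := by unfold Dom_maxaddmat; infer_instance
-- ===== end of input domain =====

-- B keeps A's helpers but replaces the per-cell try/except cascade by three overwriting
-- passes (smat, then fmat, then the regular-overlap sum): a different decomposition ("alternative").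

-- common in-place loop shape of both Pythons: `for i in range(n): m[i] = f(i, m[i])`
def setLoop {α : Type} (d : α) (f : Nat → α → α) (n : Nat) (m : List α) : List α :=
  (List.range n).foldl (fun m i => m.set i (f i (m.getD i d))) m

-- ===== PORT A =====
-- `for r in range(len(matrix))` with early `return False`, state `numsinrow`
def checkAux : List (List Int) → Int → Bool
  | [], _ => true
  | row :: rest, numsinrow =>
    if numsinrow == 0 then checkAux rest (row.length : Int)
    else if numsinrow != (row.length : Int) then false
    else checkAux rest numsinrow

def checkmatrix (matrix : List (List Int)) : Bool := checkAux matrix 0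

-- returns none where the Python returns None; fmat[0]/smat[0] as headI (callers guarantee nonempty under Pre_)
def minaddmat (fmat : List (List Int)) (smat : List (List Int)) : Option (List (List Int)) :=
  if (!checkmatrix fmat) || (!checkmatrix smat) then none
  else
    let rows := min fmat.length smat.length
    let columns := min fmat.headI.length smat.headI.length
    some (setLoop [] (fun r row =>
      setLoop 0 (fun c _ => (fmat.getD r []).getD c 0 + (smat.getD r []).getD c 0) columns row)
      rows (List.replicate rows (List.replicate columns 0)))

-- the try/except cascade for one cell: comat[r][c], else fmat[r][c], else smat[r][c], else the old value
def tryCell (comat : Option (List (List Int))) (fmat smat : List (List Int)) (r c : Nat) (cur : Int) : Int :=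
  match comat.bind (fun co => co[r]?.bind (fun row => row[c]?)) with
  | some v => v
  | none =>
    match fmat[r]?.bind (fun row => row[c]?) with
    | some v => v
    | none =>
      match smat[r]?.bind (fun row => row[c]?) with
      | some v => v
      | none => cur

def maxaddmat (fmat : List (List Int)) (smat : List (List Int)) : List (List Int) :=
  let rows := max fmat.length smat.length
  let columns := max fmat.headI.length smat.headI.length
  let remat := List.replicate rows (List.replicate columns 0)
  let comat := minaddmat fmat smat
  setLoop [] (fun r row => setLoop 0 (fun c cur => tryCell comat fmat smat r c cur) columns row)
    rows remat

-- ===== PORT B =====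
-- one overwriting pass: copy every in-bounds cell of src into remat
def writePass (src : List (List Int)) (rows columns : Nat) (remat : List (List Int)) : List (List Int) :=
  setLoop [] (fun r row =>
      let srow := src.getD r []
      setLoop 0 (fun c _ => srow.getD c 0) (min columns srow.length) row)
    (min rows src.length) remat

def maxaddmat_alt (fmat : List (List Int)) (smat : List (List Int)) : List (List Int) :=
  let rows := max fmat.length smat.length
  let columns := max fmat.headI.length smat.headI.length
  let m0 := List.replicate rows (List.replicate columns 0)
  let m1 := writePass smat rows columns m0
  let m2 := writePass fmat rows columns m1
  match minaddmat fmat smat with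
  | none => m2
  | some co =>
    setLoop [] (fun r row =>
        let crow := co.getD r []
        setLoop 0 (fun c _ => crow.getD c 0) crow.length row)
      co.length m2

-- ===== PRECONDITION & SPEC =====
-- Pre_ excludes only empty matrices, on which Python A raises IndexError at fmat[0]/smat[0]
def Pre_maxaddmat (fmat : List (List Int)) (smat : List (List Int)) : Prop := fmat ≠ [] ∧ smat ≠ []
instance (fmat : List (List Int)) (smat : List (List Int)) : Decidable (Pre_maxaddmat fmat smat) := by unfold Pre_maxaddmat; infer_instance

def pvWitness_maxaddmat : List (List Int) × List (List Int) := ([[1, 2], [3, 4]], [[5], [6], [7]])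

def Spec_maxaddmat (fmat : List (List Int)) (smat : List (List Int)) (out : List (List Int)) : Prop := out = maxaddmat_alt fmat smat
instance (fmat : List (List Int)) (smat : List (List Int)) (out : List (List Int)) : Decidable (Spec_maxaddmat fmat smat out) := by unfold Spec_maxaddmat; infer_instance

-- ===== CLAIM (what is proved, stated in full; the proofs are below) =====
def Claim_equal_maxaddmat : Prop := ∀ (fmat : List (List Int)) (smat : List (List Int)), Dom_maxaddmat fmat smat → Pre_maxaddmat fmat smat → Spec_maxaddmat fmat smat (maxaddmat fmat smat)

-- ===== LEMMAS AND PROOFS =====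

theorem getD_set {α : Type} (d a : α) (m : List α) (i j : Nat) :
    (m.set i a).getD j d = if i = j ∧ i < m.length then a else m.getD j d := by
  simp only [List.getD, List.getElem?_set]
  split_ifs with h1 h2 h3 h4 h5 <;> (simp_all; try omega)

theorem setLoop_length {α : Type} (d : α) (f : Nat → α → α) (n : Nat) (m : List α) :
    (setLoop d f n m).length = m.length := by
  induction n with
  | zero => rfl
  | succ k ih => simp [setLoop, List.range_succ, List.foldl_append] at *; simp [ih]

theorem setLoop_getD {α : Type} (d : α) (f : Nat → α → α) (n : Nat) (m : List α) (i : Nat) :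
    (setLoop d f n m).getD i d = if i < n ∧ i < m.length then f i (m.getD i d) else m.getD i d := by
  induction n generalizing i with
  | zero => simp [setLoop]
  | succ k ih =>
    have hL : (setLoop d f k m).length = m.length := setLoop_length d f k m
    have hstep : setLoop d f (k+1) m
        = (setLoop d f k m).set k (f k ((setLoop d f k m).getD k d)) := by
      simp [setLoop, List.range_succ, List.foldl_append]
    have hk : (setLoop d f k m).getD k d = m.getD k d := by
      rw [ih k]; simp
    rw [hstep, getD_set, hL, hk, ih i]
    by_cases hik : k = i
    · subst hik; by_cases h : k < m.length <;> simp [h]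
    · simp only [hik, false_and, if_false]
      by_cases h1 : i < k <;> by_cases h2 : i < m.length <;>
        first
          | (simp [h1, h2]; omega)
          | (simp [h1, h2])

theorem eq_of_getD {α : Type} (d : α) (l1 l2 : List α) (hl : l1.length = l2.length)
    (h : ∀ i, l1.getD i d = l2.getD i d) : l1 = l2 := by
  induction l1 generalizing l2 with
  | nil => cases l2 with
    | nil => rfl
    | cons b t => simp at hl
  | cons a t ih =>
    cases l2 with
    | nil => simp at hl
    | cons b t2 =>
      have h0 := h 0
      simp [List.getD] at h0
      have := ih t2 (by simpa using hl) (fun i => by simpa [List.getD] using h (i+1))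
      simp [h0, this]

theorem replicate_getD {α : Type} (d : α) (n : Nat) (x : α) (i : Nat) :
    (List.replicate n x).getD i d = if i < n then x else d := by
  by_cases h : i < n <;> simp [List.getD, h]

theorem idx2 (m : List (List Int)) (r c : Nat) :
    m[r]?.bind (fun row => row[c]?) =
    if r < m.length ∧ c < (m.getD r []).length then some ((m.getD r []).getD c 0) else none := by
  by_cases hr : r < m.length
  · rw [List.getElem?_eq_getElem hr, List.getD_eq_getElem m [] hr]
    by_cases hc : c < m[r].length
    · rw [Option.bind_some, List.getElem?_eq_getElem hc, List.getD_eq_getElem m[r] 0 hc]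
      simp [hr, hc]
    · simp [hr, hc]
  · simp [hr]

-- the regular-overlap sum matrix produced by minaddmat when both checks pass
def coMat (fmat smat : List (List Int)) : List (List Int) :=
  setLoop [] (fun r row =>
    setLoop 0 (fun c _ => (fmat.getD r []).getD c 0 + (smat.getD r []).getD c 0)
      (min fmat.headI.length smat.headI.length) row)
    (min fmat.length smat.length)
    (List.replicate (min fmat.length smat.length)
      (List.replicate (min fmat.headI.length smat.headI.length) 0))

theorem minaddmat_eq (fmat smat : List (List Int)) :
    minaddmat fmat smat =
      if (!checkmatrix fmat || !checkmatrix smat) = true then none else some (coMat fmat smat) := by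
  simp [minaddmat, coMat]

theorem coMat_length (fmat smat : List (List Int)) :
    (coMat fmat smat).length = min fmat.length smat.length := by
  simp [coMat, setLoop_length]

theorem coMat_row (fmat smat : List (List Int)) (r : Nat) (hr : r < min fmat.length smat.length) :
    (coMat fmat smat).getD r [] =
      setLoop 0 (fun c _ => (fmat.getD r []).getD c 0 + (smat.getD r []).getD c 0)
        (min fmat.headI.length smat.headI.length)
        (List.replicate (min fmat.headI.length smat.headI.length) 0) := by
  rw [coMat, setLoop_getD, List.length_replicate, replicate_getD, if_pos hr,
    if_pos ⟨hr, hr⟩]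

theorem coMat_row_len (fmat smat : List (List Int)) (r : Nat)
    (hr : r < min fmat.length smat.length) :
    ((coMat fmat smat).getD r []).length = min fmat.headI.length smat.headI.length := by
  rw [coMat_row fmat smat r hr, setLoop_length, List.length_replicate]

theorem writePass_length (src : List (List Int)) (rows cols : Nat) (m : List (List Int)) :
    (writePass src rows cols m).length = m.length := by
  simp [writePass, setLoop_length]

theorem writePass_row_len (src : List (List Int)) (rows cols : Nat) (m : List (List Int)) (r : Nat) :
    ((writePass src rows cols m).getD r []).length = (m.getD r []).length := by
  rw [writePass, setLoop_getD]
  split_ifs with h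
  · rw [setLoop_length]
  · rfl

theorem writePass_entry (src : List (List Int)) (rows cols : Nat) (m : List (List Int)) (r c : Nat) :
    ((writePass src rows cols m).getD r []).getD c 0 =
      if r < min rows src.length ∧ r < m.length ∧
         c < min cols (src.getD r []).length ∧ c < (m.getD r []).length then
        (src.getD r []).getD c 0
      else (m.getD r []).getD c 0 := by
  rw [writePass, setLoop_getD]
  by_cases h1 : r < min rows src.length ∧ r < m.length
  · rw [if_pos h1, setLoop_getD]
    by_cases h2 : c < min cols (src.getD r []).length ∧ c < (m.getD r []).length
    · rw [if_pos h2, if_pos ⟨h1.1, h1.2, h2.1, h2.2⟩]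
    · rw [if_neg h2, if_neg (fun h => h2 ⟨h.2.2.1, h.2.2.2⟩)]
  · rw [if_neg h1, if_neg (fun h => h1 ⟨h.1, h.2.1⟩)]

theorem A_length (fmat smat : List (List Int)) :
    (maxaddmat fmat smat).length = max fmat.length smat.length := by
  simp [maxaddmat, setLoop_length]

theorem B_length (fmat smat : List (List Int)) :
    (maxaddmat_alt fmat smat).length = max fmat.length smat.length := by
  unfold maxaddmat_alt
  cases minaddmat fmat smat with
  | none => simp [writePass_length]
  | some co => simp [setLoop_length, writePass_length]

theorem A_row (fmat smat : List (List Int)) (r : Nat)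
    (hr : r < max fmat.length smat.length) :
    (maxaddmat fmat smat).getD r [] =
      setLoop 0 (fun c cur => tryCell (minaddmat fmat smat) fmat smat r c cur)
        (max fmat.headI.length smat.headI.length)
        (List.replicate (max fmat.headI.length smat.headI.length) 0) := by
  rw [maxaddmat, setLoop_getD, List.length_replicate, replicate_getD, if_pos hr,
    if_pos ⟨hr, hr⟩]

theorem A_row_len (fmat smat : List (List Int)) (r : Nat)
    (hr : r < max fmat.length smat.length) :
    ((maxaddmat fmat smat).getD r []).length = max fmat.headI.length smat.headI.length := by
  rw [A_row fmat smat r hr, setLoop_length, List.length_replicate]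

theorem A_entry (fmat smat : List (List Int)) (r c : Nat)
    (hr : r < max fmat.length smat.length) :
    ((maxaddmat fmat smat).getD r []).getD c 0 =
      if c < max fmat.headI.length smat.headI.length then
        tryCell (minaddmat fmat smat) fmat smat r c 0
      else 0 := by
  rw [A_row fmat smat r hr, setLoop_getD, List.length_replicate, replicate_getD]
  split_ifs with h1 h2 h3 <;> first | rfl | omega

-- the value the two fmat/smat passes of B leave at (r,c) (also A's fallback chain)
def fsEntry (fmat smat : List (List Int)) (r c : Nat) : Int :=
  if r < fmat.length ∧ c < (fmat.getD r []).length then (fmat.getD r []).getD c 0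
  else if r < smat.length ∧ c < (smat.getD r []).length then (smat.getD r []).getD c 0
  else 0

theorem tryCell_none (fmat smat : List (List Int)) (r c : Nat) :
    tryCell none fmat smat r c 0 = fsEntry fmat smat r c := by
  unfold tryCell fsEntry
  have hnb : ((none : Option (List (List Int))).bind
      (fun co => co[r]?.bind fun row => row[c]?)) = (none : Option Int) := rfl
  rw [hnb, idx2, idx2]
  split_ifs with h1 h2 <;> rfl

theorem tryCell_some (co : List (List Int)) (fmat smat : List (List Int)) (r c : Nat) :
    tryCell (some co) fmat smat r c 0 =
      if r < co.length ∧ c < (co.getD r []).length then (co.getD r []).getD c 0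
      else fsEntry fmat smat r c := by
  unfold tryCell fsEntry
  have hsb : ((some co).bind (fun co => co[r]?.bind fun row => row[c]?))
      = co[r]?.bind fun row => row[c]? := rfl
  rw [hsb, idx2, idx2, idx2]
  split_ifs with h1 h2 h3 <;> rfl

theorem m2_entry (fmat smat : List (List Int)) (r c : Nat)
    (hr : r < max fmat.length smat.length) :
    ((writePass fmat (max fmat.length smat.length) (max fmat.headI.length smat.headI.length)
        (writePass smat (max fmat.length smat.length) (max fmat.headI.length smat.headI.length)
          (List.replicate (max fmat.length smat.length)
            (List.replicate (max fmat.headI.length smat.headI.length) 0)))).getD r []).getD c 0 =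
      if c < max fmat.headI.length smat.headI.length then fsEntry fmat smat r c else 0 := by
  have hbase_row : (List.replicate (max fmat.length smat.length)
      (List.replicate (max fmat.headI.length smat.headI.length) 0)).getD r []
      = List.replicate (max fmat.headI.length smat.headI.length) (0 : Int) := by
    rw [replicate_getD, if_pos hr]
  have hlen1 : (writePass smat (max fmat.length smat.length) (max fmat.headI.length smat.headI.length)
      (List.replicate (max fmat.length smat.length)
        (List.replicate (max fmat.headI.length smat.headI.length) 0))).length
      = max fmat.length smat.length := by
    rw [writePass_length, List.length_replicate]
  have hrow1 : ((writePass smat (max fmat.length smat.length) (max fmat.headI.length smat.headI.length)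
      (List.replicate (max fmat.length smat.length)
        (List.replicate (max fmat.headI.length smat.headI.length) 0))).getD r []).length
      = max fmat.headI.length smat.headI.length := by
    rw [writePass_row_len, hbase_row, List.length_replicate]
  rw [writePass_entry, hrow1, hlen1, writePass_entry, hbase_row, List.length_replicate,
    List.length_replicate, replicate_getD]
  unfold fsEntry
  split_ifs <;> first | rfl | omega

theorem B_entry (fmat smat : List (List Int)) (co : List (List Int)) (r c : Nat)
    (hr : r < max fmat.length smat.length)
    (hco : minaddmat fmat smat = some co)
    (hco_cols : (co.getD r []).length ≤ max fmat.headI.length smat.headI.length) :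
    ((maxaddmat_alt fmat smat).getD r []).getD c 0 =
      (if r < co.length ∧ c < (co.getD r []).length then (co.getD r []).getD c 0
       else if c < max fmat.headI.length smat.headI.length then fsEntry fmat smat r c else 0) := by
  unfold maxaddmat_alt
  rw [hco]
  simp only []
  rw [setLoop_getD]
  have hm2len : (writePass fmat (max fmat.length smat.length) (max fmat.headI.length smat.headI.length)
      (writePass smat (max fmat.length smat.length) (max fmat.headI.length smat.headI.length)
        (List.replicate (max fmat.length smat.length)
          (List.replicate (max fmat.headI.length smat.headI.length) 0)))).length
      = max fmat.length smat.length := by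
    rw [writePass_length, writePass_length, List.length_replicate]
  have hm2row : ((writePass fmat (max fmat.length smat.length) (max fmat.headI.length smat.headI.length)
      (writePass smat (max fmat.length smat.length) (max fmat.headI.length smat.headI.length)
        (List.replicate (max fmat.length smat.length)
          (List.replicate (max fmat.headI.length smat.headI.length) 0)))).getD r []).length
      = max fmat.headI.length smat.headI.length := by
    rw [writePass_row_len, writePass_row_len, replicate_getD, if_pos hr, List.length_replicate]
  rw [hm2len]
  by_cases hrc : r < co.length
  · rw [if_pos ⟨hrc, hr⟩, setLoop_getD, hm2row]
    by_cases hcc2 : c < (co.getD r []).length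
    · rw [if_pos ⟨hcc2, Nat.lt_of_lt_of_le hcc2 hco_cols⟩, if_pos ⟨hrc, hcc2⟩]
    · rw [if_neg (fun h => hcc2 h.1), if_neg (fun h => hcc2 h.2)]
      exact m2_entry fmat smat r c hr
  · rw [if_neg (fun h => hrc h.1), if_neg (fun h => hrc h.1)]
    exact m2_entry fmat smat r c hr

theorem B_entry_none (fmat smat : List (List Int)) (r c : Nat)
    (hr : r < max fmat.length smat.length)
    (hco : minaddmat fmat smat = none) :
    ((maxaddmat_alt fmat smat).getD r []).getD c 0 =
      (if c < max fmat.headI.length smat.headI.length then fsEntry fmat smat r c else 0) := by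
  unfold maxaddmat_alt
  rw [hco]
  exact m2_entry fmat smat r c hr

theorem B_row_len (fmat smat : List (List Int)) (r : Nat)
    (hr : r < max fmat.length smat.length) :
    ((maxaddmat_alt fmat smat).getD r []).length = max fmat.headI.length smat.headI.length := by
  have hm2row : ∀ (x : List (List Int)), x = writePass fmat (max fmat.length smat.length)
      (max fmat.headI.length smat.headI.length)
      (writePass smat (max fmat.length smat.length) (max fmat.headI.length smat.headI.length)
        (List.replicate (max fmat.length smat.length)
          (List.replicate (max fmat.headI.length smat.headI.length) 0))) →
      (x.getD r []).length = max fmat.headI.length smat.headI.length := by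
    intro x hx
    rw [hx, writePass_row_len, writePass_row_len, replicate_getD, if_pos hr, List.length_replicate]
  unfold maxaddmat_alt
  cases minaddmat fmat smat with
  | none => exact hm2row _ rfl
  | some co =>
    simp only []
    rw [setLoop_getD]
    split_ifs with h
    · rw [setLoop_length]; exact hm2row _ rfl
    · exact hm2row _ rfl

theorem ports_eq (fmat smat : List (List Int)) :
    maxaddmat fmat smat = maxaddmat_alt fmat smat := by
  apply eq_of_getD ([] : List Int)
  · rw [A_length, B_length]
  · intro r
    by_cases hr : r < max fmat.length smat.length
    · apply eq_of_getD (0 : Int)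
      · rw [A_row_len fmat smat r hr, B_row_len fmat smat r hr]
      · intro c
        rw [A_entry fmat smat r c hr]
        cases hco : minaddmat fmat smat with
        | none =>
          rw [B_entry_none fmat smat r c hr hco]
          by_cases hcc : c < max fmat.headI.length smat.headI.length
          · rw [if_pos hcc, if_pos hcc, tryCell_none]
          · rw [if_neg hcc, if_neg hcc]
        | some co =>
          -- co is the literal coMat, giving its length / row-length facts
          have hcoEq : co = coMat fmat smat := by
            rw [minaddmat_eq] at hco
            by_cases hchk : (!checkmatrix fmat || !checkmatrix smat) = true
            · rw [if_pos hchk] at hco; cases hco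
            · rw [if_neg hchk] at hco
              exact ((Option.some.injEq _ _).mp hco).symm
          have hcols : (co.getD r []).length ≤ max fmat.headI.length smat.headI.length := by
            by_cases hrc : r < co.length
            · rw [hcoEq] at hrc ⊢
              rw [coMat_length] at hrc
              rw [coMat_row_len fmat smat r hrc]
              omega
            · have h0 : co.getD r [] = [] := by
                rw [List.getD, List.getElem?_eq_none (Nat.le_of_not_lt hrc)]; rfl
              rw [h0]; simp
          rw [B_entry fmat smat co r c hr hco hcols]
          by_cases hcc : c < max fmat.headI.length smat.headI.length
          · rw [if_pos hcc, tryCell_some]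
            by_cases h : r < co.length ∧ c < (co.getD r []).length
            · rw [if_pos h, if_pos h]
            · rw [if_neg h, if_neg h, if_pos hcc]
          · rw [if_neg hcc,
              if_neg (fun h => hcc (Nat.lt_of_lt_of_le h.2 hcols)), if_neg hcc]
    · have hA : (maxaddmat fmat smat).getD r [] = [] := by
        rw [List.getD, List.getElem?_eq_none, Option.getD_none]
        rw [A_length]; omega
      have hB : (maxaddmat_alt fmat smat).getD r [] = [] := by
        rw [List.getD, List.getElem?_eq_none, Option.getD_none]
        rw [B_length]; omega
      rw [hA, hB]

-- ===== VERDICT (by name: the statement is the Claim_ definition above) =====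
theorem maxaddmat_spec : Claim_equal_maxaddmat := by
  intro fmat smat _ _
  exact ports_eq fmat smat
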